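-- pv_equiv track=rewrite | github.com/Doays/MoneCapture | region_capture.py | normalize_hotkey_text
-- ===== SOURCE A (Python) =====
-- from typing import Any, Callable
--
-- def normalize_hotkey_text(raw: Any, fallback: str) -> str:
--     text = str(raw).strip()
--     if not text:
--         return fallback
--     replacements = {
--         "<ctrl>": "Ctrl",
--         "<control>": "Ctrl",
--         "<shift>": "Shift",
--         "<alt>": "Alt",
--         "<cmd>": "Win",
--         "<win>": "Win",
--     }
--     normalized = text.lower()
--     for source, target in replacements.items():
--         normalized = normalized.replace(source, target)
--     return "+".join(part.strip() for part in normalized.split("+") if part.strip())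
-- ===== SOURCE B (Python) =====
-- _REPLACEMENTS = (
--     ("<ctrl>", "Ctrl"),
--     ("<control>", "Ctrl"),
--     ("<shift>", "Shift"),
--     ("<alt>", "Alt"),
--     ("<cmd>", "Win"),
--     ("<win>", "Win"),
-- )
--
--
-- def normalize_hotkey_text(raw, fallback):
--     text = str(raw).strip()
--     if not text:
--         return fallback
--     s = text.lower()
--     out = []
--     i = 0
--     n = len(s)
--     while i < n:
--         for src, tgt in _REPLACEMENTS:
--             if s.startswith(src, i):
--                 out.append(tgt)
--                 i += len(src)
--                 break
--         else:
--             out.append(s[i])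
--             i += 1
--     normalized = "".join(out)
--     return "+".join(part.strip() for part in normalized.split("+") if part.strip())
-- ===== Notes on version B (the rewrite author's own statement) =====
-- stated objective: alternative
-- what changed: A runs six sequential full-string .replace passes (one scan per replacement key); B makes a single left-to-right scan over the string, emitting the target at the first matching key or copying one character, building the output once.
import Mathlib
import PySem

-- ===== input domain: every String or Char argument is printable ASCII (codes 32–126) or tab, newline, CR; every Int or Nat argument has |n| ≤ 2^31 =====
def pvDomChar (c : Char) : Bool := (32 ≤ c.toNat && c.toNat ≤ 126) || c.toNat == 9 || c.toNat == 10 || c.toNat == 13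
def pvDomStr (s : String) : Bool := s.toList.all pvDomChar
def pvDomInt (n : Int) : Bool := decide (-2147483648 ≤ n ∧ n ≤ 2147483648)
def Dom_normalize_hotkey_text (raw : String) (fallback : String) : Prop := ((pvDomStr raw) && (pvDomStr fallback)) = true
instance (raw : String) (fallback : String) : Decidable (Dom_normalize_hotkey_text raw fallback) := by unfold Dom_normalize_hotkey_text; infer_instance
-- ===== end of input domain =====

-- B replaces A's six sequential full-string .replace passes by ONE left-to-right scan with a
-- first-match dispatch over the same replacement table (objective: alternative single-pass algorithm).

-- ===== PORT A =====
-- dict literal → association list in insertion order; the for-loop over .items() → foldl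
def normalize_hotkey_text (raw : String) (fallback : String) : String :=
  let text := PySem.Str.strip raw
  if text = "" then fallback
  else
    let replacements : List (String × String) :=
      [("<ctrl>", "Ctrl"), ("<control>", "Ctrl"), ("<shift>", "Shift"),
       ("<alt>", "Alt"), ("<cmd>", "Win"), ("<win>", "Win")]
    let normalized :=
      replacements.foldl (fun s kv => PySem.Str.replace s kv.1 kv.2) (PySem.Str.lower text)
    PySem.Str.join "+"
      ((((PySem.Str.split? normalized "+").getD []).map PySem.Str.strip).filter (fun p => !(p == "")))

-- ===== PORT B =====
def nhkRules : List (List Char × List Char) :=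
  [("<ctrl>".toList, "Ctrl".toList), ("<control>".toList, "Ctrl".toList),
   ("<shift>".toList, "Shift".toList), ("<alt>".toList, "Alt".toList),
   ("<cmd>".toList, "Win".toList), ("<win>".toList, "Win".toList)]

-- B's inner for-loop with break: first rule whose key starts the rest of the string
def nhkTry : List (List Char × List Char) → List Char → Option (List Char × Nat)
  | [], _ => none
  | (k, t) :: rs, s => if k.isPrefixOf s then some (t, k.length) else nhkTry rs s

-- B's while-loop: one left-to-right scan, emitting a target or copying one character
def nhkScan : List Char → List Char
  | [] => []
  | c :: t =>
    match nhkTry nhkRules (c :: t) with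
    | some (tg, n) => tg ++ nhkScan (t.drop (n - 1))
    | none => c :: nhkScan t
  termination_by s => s.length
  decreasing_by
  · simp only [List.length_cons, List.length_drop]; omega
  · simp

def normalize_hotkey_text_alt (raw : String) (fallback : String) : String :=
  let text := PySem.Str.strip raw
  if text = "" then fallback
  else
    let normalized := String.ofList (nhkScan (PySem.Chars.lower text.toList))
    PySem.Str.join "+"
      ((((PySem.Str.split? normalized "+").getD []).map PySem.Str.strip).filter (fun p => !(p == "")))

-- ===== PRECONDITION & SPEC =====
def Spec_normalize_hotkey_text (raw : String) (fallback : String) (out : String) : Prop := out = normalize_hotkey_text_alt raw fallback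
instance (raw : String) (fallback : String) (out : String) : Decidable (Spec_normalize_hotkey_text raw fallback out) := by unfold Spec_normalize_hotkey_text; infer_instance

-- ===== CLAIM (what is proved, stated in full; the proofs are below) =====
def Claim_equal_normalize_hotkey_text : Prop := ∀ (raw : String) (fallback : String), Dom_normalize_hotkey_text raw fallback → Spec_normalize_hotkey_text raw fallback (normalize_hotkey_text raw fallback)

-- ===== LEMMAS AND PROOFS =====

def pvUpper (c : Char) : Bool := 'A' ≤ c && c ≤ 'Z'

-- a good rule: key = '<' :: k' with no further '<' and no uppercase char;
-- target nonempty, starts with an uppercase char, contains no '<'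
def pvGoodB (r : List Char × List Char) : Bool :=
  match r with
  | ('<' :: k', b :: t') =>
    k'.all (fun c => !(c == '<')) && ('<' :: k').all (fun c => !pvUpper c) &&
    pvUpper b && (b :: t').all (fun c => !(c == '<'))
  | _ => false

def pvNonPref (a b : List Char × List Char) : Prop := ¬ a.1 <+: b.1 ∧ ¬ b.1 <+: a.1

-- spec-level single replacement (Python str.replace: left-to-right, non-overlapping)
def pvRep (old tgt : List Char) : List Char → List Char
  | [] => []
  | c :: t =>
    if old.isPrefixOf (c :: t) then tgt ++ pvRep old tgt (t.drop (old.length - 1))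
    else c :: pvRep old tgt t
  termination_by s => s.length
  decreasing_by
  · simp only [List.length_cons, List.length_drop]; omega
  · simp

def pvChain (rules : List (List Char × List Char)) (s : List Char) : List Char :=
  rules.foldl (fun s kv => pvRep kv.1 kv.2 s) s

theorem pvRep_nil (old tgt : List Char) : pvRep old tgt [] = [] := by rw [pvRep]

theorem pvRep_cons (old tgt : List Char) (c : Char) (t : List Char) :
    pvRep old tgt (c :: t) =
      if old.isPrefixOf (c :: t) then tgt ++ pvRep old tgt (t.drop (old.length - 1))
      else c :: pvRep old tgt t := by rw [pvRep]

theorem not_prefix_append {a b X : List Char} (h1 : ¬ a <+: b) (h2 : ¬ b <+: a) :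
    ¬ a <+: b ++ X := fun hp =>
  (List.prefix_or_prefix_of_prefix hp (List.prefix_append b X)).elim h1 h2

theorem not_prefix_head {o' q' X : List Char} {d : Char} (hd : d ≠ '<') :
    ¬ ('<' :: o') <+: (d :: q') ++ X := by
  intro hp
  rw [List.cons_append, List.cons_prefix_cons] at hp
  exact hd hp.1.symm

theorem pvRep_append (old tgt p X : List Char)
    (h : ∀ q, q <:+ p → q ≠ [] → ¬ old <+: q ++ X) :
    pvRep old tgt (p ++ X) = p ++ pvRep old tgt X := by
  induction p with
  | nil => simp
  | cons c p' ih =>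
    have hni : ¬ List.isPrefixOf old (c :: (p' ++ X)) = true := by
      rw [List.isPrefixOf_iff_prefix]
      simpa using h (c :: p') List.suffix_rfl (by simp)
    rw [List.cons_append, pvRep_cons, if_neg hni,
      ih (fun q hq hne => h q (hq.trans (List.suffix_cons c p')) hne)]
    simp

-- a prefix made of non-uppercase chars survives undoing one replacement whose target starts uppercase
theorem pvRep_prefix_rev {old tgt : List Char} (u : List Char) {s : List Char}
    (htgt : ∃ b t', tgt = b :: t' ∧ pvUpper b = true)
    (hs : ∀ c ∈ s, pvUpper c = false) :
    s <+: pvRep old tgt u → s <+: u := by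
  induction u generalizing s with
  | nil =>
    rw [pvRep_nil]
    intro hp
    rw [List.prefix_nil] at hp
    simp [hp]
  | cons c t ih =>
    rw [pvRep_cons]
    split_ifs with hm
    · intro hp
      cases s with
      | nil => exact List.nil_prefix
      | cons a s' =>
        obtain ⟨b, t', htgt', hb⟩ := htgt
        rw [htgt', List.cons_append, List.cons_prefix_cons] at hp
        have : pvUpper a = false := hs a (List.mem_cons_self ..)
        rw [hp.1, hb] at this
        cases this
    · intro hp
      cases s with
      | nil => exact List.nil_prefix
      | cons a s' =>
        rw [List.cons_prefix_cons] at hp ⊢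
        exact ⟨hp.1, ih (fun c hc => hs c (List.mem_cons_of_mem a hc)) hp.2⟩

theorem replace_go_eq (old new : List Char) (h : old ≠ []) :
    ∀ (fuel : Nat) (l acc : List Char), l.length ≤ fuel →
      PySem.Chars.replace.go old new fuel l acc = acc.reverse ++ pvRep old new l := by
  intro fuel
  induction fuel with
  | zero =>
    intro l acc hl
    have hln : l = [] := by cases l <;> simp_all
    subst hln
    simp [PySem.Chars.replace.go, pvRep_nil]
  | succ n ih =>
    intro l acc hl
    cases l with
    | nil => simp [PySem.Chars.replace.go, pvRep_nil]
    | cons c t =>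
      obtain ⟨o0, old', rfl⟩ : ∃ o0 old', old = o0 :: old' := by
        cases old with
        | nil => exact absurd rfl h
        | cons a b => exact ⟨a, b, rfl⟩
      rw [PySem.Chars.replace.go]
      by_cases hm : List.isPrefixOf (o0 :: old') (c :: t)
      · rw [if_pos hm, pvRep_cons, if_pos hm, ih]
        · simp [List.drop_succ_cons]
        · simp only [List.length_cons] at hl
          simp only [List.length_drop, List.length_cons]
          omega
      · rw [if_neg hm, pvRep_cons, if_neg hm, ih]
        · simp
        · simp only [List.length_cons] at hl
          omega

theorem replace_eq_pvRep (s old new : List Char) (h : old ≠ []) :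
    PySem.Chars.replace s old new = pvRep old new s := by
  rw [PySem.Chars.replace, if_neg (by simpa [List.isEmpty_iff] using h)]
  simpa using replace_go_eq old new h s.length s [] le_rfl

theorem pvGood_shape (r : List Char × List Char) (h : pvGoodB r = true) :
    ∃ k' b t', r.1 = '<' :: k' ∧ (∀ c ∈ k', c ≠ '<') ∧ (∀ c ∈ r.1, pvUpper c = false) ∧
      r.2 = b :: t' ∧ pvUpper b = true ∧ (∀ c ∈ r.2, c ≠ '<') := by
  obtain ⟨k, t⟩ := r
  match k, t with
  | '<' :: k', b :: t' =>
    simp only [pvGoodB, Bool.and_eq_true, List.all_eq_true] at h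
    refine ⟨k', b, t', rfl, ?_, ?_, rfl, h.1.2, ?_⟩
    · intro c hc; simpa using h.1.1.1 c hc
    · intro c hc; simpa using h.1.1.2 c hc
    · intro c hc; simpa using h.2 c hc
  | [], t => simp [pvGoodB] at h
  | c :: k', [] => simp [pvGoodB] at h
  | c :: k', b :: t' =>
    by_cases hc : c = '<'
    · subst hc
      simp only [pvGoodB, Bool.and_eq_true, List.all_eq_true] at h
      refine ⟨k', b, t', rfl, ?_, ?_, rfl, h.1.2, ?_⟩
      · intro x hx; simpa using h.1.1.1 x hx
      · intro x hx; simpa using h.1.1.2 x hx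
      · intro x hx; simpa using h.2 x hx
    · exfalso
      apply hc
      unfold pvGoodB at h
      split at h
      · rename_i heq
        have := congrArg Prod.fst heq
        simp at this
        exact this.1
      · cases h

theorem pvRep_cons_of_nomatch (old tgt : List Char) (c : Char) (u : List Char)
    (h : ¬ old <+: c :: u) : pvRep old tgt (c :: u) = c :: pvRep old tgt u := by
  rw [pvRep_cons, if_neg (by rw [List.isPrefixOf_iff_prefix]; exact h)]

-- when no key matches at the front, the whole replace chain keeps the head char:
-- a NEW front match after a replacement would have to cover the target's uppercase head
theorem pvChain_cons_of_nomatch (rules : List (List Char × List Char))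
    (hG : ∀ r ∈ rules, pvGoodB r = true) (c : Char) (u : List Char)
    (h : ∀ r ∈ rules, ¬ r.1 <+: c :: u) :
    pvChain rules (c :: u) = c :: pvChain rules u := by
  induction rules generalizing u with
  | nil => rfl
  | cons r0 rs ih =>
    simp only [pvChain, List.foldl_cons]
    rw [pvRep_cons_of_nomatch _ _ _ _ (h r0 (List.mem_cons_self ..))]
    refine ih (fun r hr => hG r (List.mem_cons_of_mem _ hr)) _ ?_
    intro r hr hp
    obtain ⟨k', b, t', hk, hk'lt, _, ht, hb, _⟩ := pvGood_shape r (hG r (List.mem_cons_of_mem _ hr))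
    rw [hk, List.cons_prefix_cons] at hp
    have hk'u : k' <+: u := by
      refine pvRep_prefix_rev u ?_ ?_ hp.2
      · obtain ⟨k0', b0, t0', _, _, _, ht0, hb0, _⟩ := pvGood_shape r0 (hG r0 (List.mem_cons_self ..))
        exact ⟨b0, t0', ht0, hb0⟩
      · intro x hx
        obtain ⟨_, _, _, _, _, hup, _, _, _⟩ := pvGood_shape r (hG r (List.mem_cons_of_mem _ hr))
        exact hup x (hk ▸ List.mem_cons_of_mem _ hx)
    exact h r (List.mem_cons_of_mem _ hr) (by rw [hk, hp.1, List.cons_prefix_cons]; exact ⟨rfl, hk'u⟩)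

theorem foldl_rep_append (pre : List (List Char × List Char)) (p : List Char)
    (h : ∀ r ∈ pre, ∀ X, pvRep r.1 r.2 (p ++ X) = p ++ pvRep r.1 r.2 X) :
    ∀ X, List.foldl (fun s kv => pvRep kv.1 kv.2 s) (p ++ X) pre
      = p ++ List.foldl (fun s kv => pvRep kv.1 kv.2 s) X pre := by
  induction pre with
  | nil => intro X; rfl
  | cons r rs ih =>
    intro X
    simp only [List.foldl_cons]
    rw [h r (List.mem_cons_self ..) X]
    exact ih (fun r hr X => h r (List.mem_cons_of_mem _ hr) X) _

-- another rule's replacement passes over a key standing at the front ('<' occurs only at key heads)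
theorem rep_pass_key (old : List Char) (k' : List Char) (o' : List Char)
    (hold : old = '<' :: o') (hk' : ∀ c ∈ k', c ≠ '<')
    (h1 : ¬ old <+: '<' :: k') (h2 : ¬ ('<' :: k') <+: old) (tg2 : List Char) (X : List Char) :
    pvRep old tg2 (('<' :: k') ++ X) = ('<' :: k') ++ pvRep old tg2 X := by
  refine pvRep_append _ _ _ _ ?_
  intro q hq hne
  rcases List.suffix_cons_iff.mp hq with rfl | hq'
  · exact not_prefix_append h1 h2
  · obtain ⟨d, q', rfl⟩ : ∃ d q', q = d :: q' := by
      cases q with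
      | nil => exact absurd rfl hne
      | cons a b => exact ⟨a, b, rfl⟩
    have hd : d ∈ k' := hq'.sublist.mem (List.mem_cons_self ..)
    rw [hold]
    exact not_prefix_head (hk' d hd)

-- a replacement passes over an already-substituted target (targets contain no '<')
theorem rep_pass_tgt (old tgt p : List Char) (o' : List Char)
    (hold : old = '<' :: o') (hp : ∀ c ∈ p, c ≠ '<') (X : List Char) :
    pvRep old tgt (p ++ X) = p ++ pvRep old tgt X := by
  refine pvRep_append _ _ _ _ ?_
  intro q hq hne
  obtain ⟨d, q', rfl⟩ : ∃ d q', q = d :: q' := by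
    cases q with
    | nil => exact absurd rfl hne
    | cons a b => exact ⟨a, b, rfl⟩
  have hd : d ∈ p := hq.sublist.mem (List.mem_cons_self ..)
  rw [hold]
  exact not_prefix_head (hp d hd)

-- when rule (k, tg) matches at the front, the whole chain replaces it and recurses on the rest
theorem pvChain_match (pre post : List (List Char × List Char)) (k tg X : List Char)
    (hG : ∀ r ∈ pre ++ (k, tg) :: post, pvGoodB r = true)
    (hPW : (pre ++ (k, tg) :: post).Pairwise pvNonPref) :
    pvChain (pre ++ (k, tg) :: post) (k ++ X) = tg ++ pvChain (pre ++ (k, tg) :: post) X := by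
  obtain ⟨k', b, t', hk, hk'lt, _, htg, hb, htglt⟩ :=
    pvGood_shape (k, tg) (hG _ (by simp))
  simp only at hk htg hk'lt htglt
  rcases List.pairwise_append.mp hPW with ⟨_, _, hcross⟩
  simp only [pvChain, List.foldl_append, List.foldl_cons]
  have hpass1 : ∀ r ∈ pre, ∀ Y, pvRep r.1 r.2 (k ++ Y) = k ++ pvRep r.1 r.2 Y := by
    intro r hr Y
    obtain ⟨o', _, _, ho, _, _, _, _, _⟩ := pvGood_shape r (hG r (List.mem_append_left _ hr))
    have hnp := hcross r hr (k, tg) (List.mem_cons_self ..)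
    rw [hk]
    exact rep_pass_key r.1 k' o' ho hk'lt (hk ▸ hnp.1) (hk ▸ hnp.2) r.2 Y
  have h1 : List.foldl (fun s kv => pvRep kv.1 kv.2 s) (k ++ X) pre
      = k ++ List.foldl (fun s kv => pvRep kv.1 kv.2 s) X pre :=
    foldl_rep_append pre k hpass1 X
  rw [h1]
  set P := List.foldl (fun s kv => pvRep kv.1 kv.2 s) X pre with hP
  have h2 : pvRep k tg (k ++ P) = tg ++ pvRep k tg P := by
    rw [hk, List.cons_append, pvRep_cons,
      if_pos (by rw [List.isPrefixOf_iff_prefix, ← List.cons_append, ← hk]; exact List.prefix_append _ _)]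
    congr 1
    congr 1
    have : ('<' :: k').length - 1 = k'.length := by simp
    rw [this, List.drop_left]
  rw [h2]
  have hpass2 : ∀ r ∈ post, ∀ Y, pvRep r.1 r.2 (tg ++ Y) = tg ++ pvRep r.1 r.2 Y := by
    intro r hr Y
    obtain ⟨o', _, _, ho, _, _, _, _, _⟩ :=
      pvGood_shape r (hG r (List.mem_append_right _ (List.mem_cons_of_mem _ hr)))
    exact rep_pass_tgt r.1 r.2 tg o' ho htglt Y
  exact foldl_rep_append post tg hpass2 (pvRep k tg P)

theorem nhkTry_eq_none (rules : List (List Char × List Char)) (s : List Char)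
    (h : nhkTry rules s = none) : ∀ r ∈ rules, ¬ r.1 <+: s := by
  induction rules with
  | nil => simp
  | cons r rs ih =>
    obtain ⟨k, t⟩ := r
    simp only [nhkTry] at h
    split_ifs at h with hm
    intro r hr
    rcases List.mem_cons.mp hr with rfl | hr'
    · simpa [List.isPrefixOf_iff_prefix] using hm
    · exact ih h r hr'

theorem nhkTry_eq_some (rules : List (List Char × List Char)) (s tg : List Char) (n : Nat)
    (h : nhkTry rules s = some (tg, n)) :
    ∃ pre k post, rules = pre ++ (k, tg) :: post ∧ n = k.length ∧ k <+: s ∧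
      ∀ r ∈ pre, ¬ r.1 <+: s := by
  induction rules with
  | nil => simp [nhkTry] at h
  | cons r rs ih =>
    obtain ⟨k0, t0⟩ := r
    simp only [nhkTry] at h
    split_ifs at h with hm
    · injection h with h'
      injection h' with h1 h2
      exact ⟨[], k0, rs, by simp [h1], h2.symm, List.isPrefixOf_iff_prefix.mp hm, by simp⟩
    · obtain ⟨pre, k, post, hr, hn, hk, hpre⟩ := ih h
      refine ⟨(k0, t0) :: pre, k, post, by rw [hr]; rfl, hn, hk, ?_⟩
      intro r hr'
      rcases List.mem_cons.mp hr' with rfl | hr''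
      · simpa [List.isPrefixOf_iff_prefix] using hm
      · exact hpre r hr''

theorem nhkRules_good : ∀ r ∈ nhkRules, pvGoodB r = true := by decide

theorem nhkRules_pw : nhkRules.Pairwise pvNonPref := by
  unfold pvNonPref; decide

theorem pvChain_nil (rules : List (List Char × List Char)) : pvChain rules [] = [] := by
  induction rules with
  | nil => rfl
  | cons r rs ih => simp only [pvChain, List.foldl_cons, pvRep_nil] at ih ⊢; exact ih

theorem chain_eq_scan_aux : ∀ (n : Nat) (s : List Char), s.length ≤ n →
    pvChain nhkRules s = nhkScan s := by
  intro n
  induction n with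
  | zero =>
    intro s hl
    have : s = [] := by cases s <;> simp_all
    subst this
    rw [pvChain_nil, nhkScan]
  | succ n ih =>
    intro s hl
    cases s with
    | nil => rw [pvChain_nil, nhkScan]
    | cons c t =>
      cases htry : nhkTry nhkRules (c :: t) with
      | none =>
        have hscan : nhkScan (c :: t) = c :: nhkScan t := by rw [nhkScan, htry]
        rw [hscan, pvChain_cons_of_nomatch _ nhkRules_good _ _ (nhkTry_eq_none _ _ htry),
          ih t (by simp only [List.length_cons] at hl; omega)]
      | some pr =>
        obtain ⟨tg, m⟩ := pr
        obtain ⟨pre, k, post, hr, hn, hk, hpre⟩ := nhkTry_eq_some _ _ _ _ htry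
        have hmem : (k, tg) ∈ nhkRules := by
          rw [hr]; exact List.mem_append_right _ (List.mem_cons_self ..)
        obtain ⟨k', b, t', hk1, _, _, _, _, _⟩ := pvGood_shape _ (nhkRules_good _ hmem)
        simp only at hk1
        obtain ⟨X, hX⟩ := hk
        have ht : t = k' ++ X := by
          rw [hk1] at hX
          injection hX with h1 h2
          exact h2.symm
        have hdrop : t.drop (m - 1) = X := by
          rw [ht, hn, hk1]
          simp only [List.length_cons, Nat.add_sub_cancel]
          exact List.drop_left
        have hscan : nhkScan (c :: t) = tg ++ nhkScan (t.drop (m - 1)) := by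
          rw [nhkScan, htry]
        have hXlen : X.length ≤ n := by
          simp only [List.length_cons] at hl
          have := congrArg List.length ht
          simp at this
          omega
        calc pvChain nhkRules (c :: t)
            = pvChain (pre ++ (k, tg) :: post) (k ++ X) := by rw [← hr, hX]
          _ = tg ++ pvChain (pre ++ (k, tg) :: post) X := by
              exact pvChain_match pre post k tg X (hr ▸ nhkRules_good) (hr ▸ nhkRules_pw)
          _ = tg ++ nhkScan (t.drop (m - 1)) := by rw [← hr, hdrop, ih X hXlen]
          _ = nhkScan (c :: t) := hscan.symm

theorem chain_eq_scan (s : List Char) : pvChain nhkRules s = nhkScan s :=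
  chain_eq_scan_aux s.length s le_rfl

theorem normalized_eq (cs : List Char) :
    [("<ctrl>", "Ctrl"), ("<control>", "Ctrl"), ("<shift>", "Shift"),
       ("<alt>", "Alt"), ("<cmd>", "Win"), ("<win>", "Win")].foldl
      (fun s (kv : String × String) => PySem.Str.replace s kv.1 kv.2) (String.ofList cs)
    = String.ofList (nhkScan cs) := by
  have hchain := chain_eq_scan cs
  simp only [pvChain, nhkRules, List.foldl_cons, List.foldl_nil] at hchain
  have hinj : ∀ a b : String, a.toList = b.toList → a = b := by
    intro a b hab
    rw [← String.ofList_toList (s := a), ← String.ofList_toList (s := b), hab]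
  apply hinj
  simp only [List.foldl_cons, List.foldl_nil]
  simp only [PySem.Str.toList_replace]
  rw [← hchain]
  simp only [String.toList_ofList]
  rw [replace_eq_pvRep _ _ _ (by decide), replace_eq_pvRep _ _ _ (by decide),
    replace_eq_pvRep _ _ _ (by decide), replace_eq_pvRep _ _ _ (by decide),
    replace_eq_pvRep _ _ _ (by decide), replace_eq_pvRep _ _ _ (by decide)]

theorem ports_agree (raw fallback : String) :
    normalize_hotkey_text raw fallback = normalize_hotkey_text_alt raw fallback := by
  simp only [normalize_hotkey_text, normalize_hotkey_text_alt]
  split_ifs with h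
  · rfl
  · have key :
        [("<ctrl>", "Ctrl"), ("<control>", "Ctrl"), ("<shift>", "Shift"),
         ("<alt>", "Alt"), ("<cmd>", "Win"), ("<win>", "Win")].foldl
          (fun s (kv : String × String) => PySem.Str.replace s kv.1 kv.2)
          (PySem.Str.lower (PySem.Str.strip raw))
        = String.ofList (nhkScan (PySem.Chars.lower (PySem.Str.strip raw).toList)) := by
      rw [← String.ofList_toList (s := PySem.Str.lower (PySem.Str.strip raw)),
        PySem.Str.toList_lower]
      exact normalized_eq _
    rw [key]

-- ===== VERDICT (by name: the statement is the Claim_ definition above) =====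
theorem normalize_hotkey_text_spec : Claim_equal_normalize_hotkey_text := by
  intro raw fallback _
  unfold Spec_normalize_hotkey_text
  exact ports_agree raw fallback
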